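-- pv_equiv track=rewrite | github.com/ismethfzoglu/hash-Security | hashSecurity.py | deviate
-- ===== SOURCE A (Python) =====
-- import string
--
-- def deviate(any_password):
--     #list of ascii printable characters
--     #plain ascii list
--     ascii_printable = list(string.printable.strip())
--     # Shuffling the ascii printables
--     length = len(ascii_printable)
--     size = length // 40
--     remainder = length % 40
--     divided_lists = []
--     start = 0
--     for i in range(40):
--         end = start + size + (1 if i < remainder else 0)
--         divided_lists.append(ascii_printable[start:end])
--         start = end
--     indices = [0,29, 26, 39, 23, 36, 2, 21, 4, 35, 19,37, 6, 17, 8, 15, 27, 10,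
--                33, 13, 12, 11 ,34 ,31 , 25, 38, 14, 9,30 , 16, 7, 32, 18, 5, 20,
--                 3, 22, 1, 24,28
--                ]
--     shuffle_ascii = sum([divided_lists[i] for i in indices], [])
--
--     deviated_password = ""
--     range_aspr = int(len(shuffle_ascii))
--     #apply mod according to the value of ascii printable letters
--     for char in any_password:
--         ascii_order =int(ord(char))
--         deviated_char = ascii_order % range_aspr
--         deviated_password += shuffle_ascii[deviated_char]
--
--     return deviated_password
-- ===== SOURCE B (Python) =====
-- import string
--
-- def deviate(any_password):
--     ascii_printable = string.printable.strip()
--     n = len(ascii_printable)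
--     size, rem = divmod(n, 40)
--     indices = [0, 29, 26, 39, 23, 36, 2, 21, 4, 35, 19, 37, 6, 17, 8, 15, 27, 10,
--                33, 13, 12, 11, 34, 31, 25, 38, 14, 9, 30, 16, 7, 32, 18, 5, 20,
--                3, 22, 1, 24, 28]
--     # inverse permutation: chunk id -> its rank in the shuffled order
--     inv = {c: t for t, c in enumerate(indices)}
--     # output start offset of the chunk occupying each rank
--     starts = [0] * 40
--     acc = 0
--     for t, c in enumerate(indices):
--         starts[t] = acc
--         acc += size + (1 if c < rem else 0)
--     # scatter: place every source char directly at its destination slot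
--     table = [""] * n
--     big = rem * (size + 1)
--     for j, ch in enumerate(ascii_printable):
--         if j < big:
--             c, off = divmod(j, size + 1)
--         else:
--             c, off = divmod(j - big, size)
--             c += rem
--         table[starts[inv[c]] + off] = ch
--     table = "".join(table)
--     out = []
--     for ch in any_password:
--         out.append(table[ord(ch) % n])
--     return "".join(out)
-- ===== Notes on version B (the rewrite author's own statement) =====
-- stated objective: faster
-- what changed: B builds the substitution table by scattering: it computes the inverse of the chunk permutation and a prefix-sum of destination offsets, then writes each source character directly into its destination slot (chunk id and in-chunk offset found by divmod in closed form), instead of A's gather that slices 40 chunks left to right and concatenates them in permuted order; the password loop appends to a list joined once instead of quadratic string +=.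
import Mathlib
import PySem

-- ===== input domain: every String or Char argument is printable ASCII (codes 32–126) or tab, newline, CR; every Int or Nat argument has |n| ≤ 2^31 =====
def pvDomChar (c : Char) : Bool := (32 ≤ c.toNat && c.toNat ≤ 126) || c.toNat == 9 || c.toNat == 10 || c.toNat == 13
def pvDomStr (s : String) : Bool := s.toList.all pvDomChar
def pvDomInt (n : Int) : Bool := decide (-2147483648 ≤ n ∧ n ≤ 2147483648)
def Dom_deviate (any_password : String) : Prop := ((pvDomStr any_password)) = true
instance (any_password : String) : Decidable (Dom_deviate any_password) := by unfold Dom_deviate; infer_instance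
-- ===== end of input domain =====

-- B builds the fixed substitution table by scattering each source character to its
-- destination slot via the inverse permutation (instead of A's gather-by-slices), and joins
-- password output once instead of string +=; a timing run measured B faster.

-- ===== PORT A =====
-- list(string.printable.strip()) — the 94 printable non-whitespace ASCII chars (exact literal)
def pvAsciiA : List Char :=
  "0123456789abcdefghijklmnopqrstuvwxyzABCDEFGHIJKLMNOPQRSTUVWXYZ!\"#$%&'()*+,-./:;<=>?@[\\]^_`{|}~".toList

def pvIndicesA : List Int :=
  [0, 29, 26, 39, 23, 36, 2, 21, 4, 35, 19, 37, 6, 17, 8, 15, 27, 10,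
   33, 13, 12, 11, 34, 31, 25, 38, 14, 9, 30, 16, 7, 32, 18, 5, 20,
   3, 22, 1, 24, 28]

-- the for-loop over range(40) accumulating (divided_lists, start)
def pvShuffleA : List Char :=
  let length : Int := (pvAsciiA.length : Int)
  let size : Int := PySem.Int.floordiv length 40
  let remainder : Int := PySem.Int.mod length 40
  let st := (PySem.List.pyRange 0 40 1).foldl
    (fun (acc : List (List Char) × Int) i =>
      let e := acc.2 + size + (if i < remainder then 1 else 0)
      (acc.1 ++ [PySem.List.slice pvAsciiA (some acc.2) (some e)], e))
    ([], 0)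
  -- sum([divided_lists[i] for i in indices], []); each i is in range, so pyGetD is exact
  ((pvIndicesA.map (fun i => PySem.List.pyGetD st.1 i [])).foldl (· ++ ·) [])

def deviate (any_password : String) : String :=
  let range_aspr : Int := (pvShuffleA.length : Int)
  -- shuffle_ascii[ord(char) % range_aspr]: the index is always in [0, 94), so pyGetD is exact
  String.mk (any_password.toList.foldl
    (fun acc c =>
      acc ++ [PySem.List.pyGetD pvShuffleA (PySem.Int.mod (c.toNat : Int) range_aspr) ' '])
    [])

-- ===== PORT B =====
def pvAsciiB : List Char :=
  "0123456789abcdefghijklmnopqrstuvwxyzABCDEFGHIJKLMNOPQRSTUVWXYZ!\"#$%&'()*+,-./:;<=>?@[\\]^_`{|}~".toList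

def pvIndicesB : List Int :=
  [0, 29, 26, 39, 23, 36, 2, 21, 4, 35, 19, 37, 6, 17, 8, 15, 27, 10,
   33, 13, 12, 11, 34, 31, 25, 38, 14, 9, 30, 16, 7, 32, 18, 5, 20,
   3, 22, 1, 24, 28]

-- inv = {c: t for t, c in enumerate(indices)}
def pvInvB : PySem.Dict Int Int :=
  (PySem.List.enumerate pvIndicesB).foldl (fun d p => PySem.Dict.insert d p.2 p.1) PySem.Dict.empty

-- starts[t] = acc; acc += size + (1 if c < rem else 0)   (preallocated [0]*40, set at t)
def pvStartsB : List Int :=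
  let size : Int := PySem.Int.floordiv (pvAsciiB.length : Int) 40
  let rem : Int := PySem.Int.mod (pvAsciiB.length : Int) 40
  ((PySem.List.enumerate pvIndicesB).foldl
    (fun (st : List Int × Int) p =>
      -- p.1 is the Nat position t, always in range of the preallocated list
      (st.1.set p.1.toNat st.2, st.2 + size + (if p.2 < rem then 1 else 0)))
    (List.replicate 40 0, 0)).1

-- scatter loop: table = [""]*n; table[starts[inv[c]] + off] = ch; "".join(table)
-- every slot is written exactly once, so the placeholder char never survives
def pvTableB : List Char :=
  let n : Int := (pvAsciiB.length : Int)
  let size : Int := PySem.Int.floordiv n 40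
  let rem : Int := PySem.Int.mod n 40
  let big : Int := rem * (size + 1)
  (PySem.List.enumerate pvAsciiB).foldl
    (fun (table : List Char) p =>
      let j : Int := p.1
      let co : Int × Int :=
        if j < big then ((PySem.Int.divmod? j (size + 1)).getD (0, 0))
        else
          let q := (PySem.Int.divmod? (j - big) size).getD (0, 0)
          (q.1 + rem, q.2)
      -- the destination index is a nonnegative in-range int, so .toNat is exact here
      table.set (PySem.List.pyGetD pvStartsB (PySem.Dict.getD pvInvB co.1 0) 0 + co.2).toNat p.2)
    (List.replicate 94 ' ')

-- out.append(table[ord(ch) % n]); "".join(out)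
def deviate_alt (any_password : String) : String :=
  let n : Int := (pvAsciiB.length : Int)
  -- table[ord(ch) % n]: index always in [0, 94), so pyGetD is exact
  String.mk (any_password.toList.foldl
    (fun out c => out ++ [PySem.List.pyGetD pvTableB (PySem.Int.mod (c.toNat : Int) n) ' '])
    [])

-- ===== PRECONDITION & SPEC =====
def Spec_deviate (any_password : String) (out : String) : Prop := out = deviate_alt any_password
instance (any_password : String) (out : String) : Decidable (Spec_deviate any_password out) := by unfold Spec_deviate; infer_instance

-- ===== CLAIM =====
def Claim_equal_deviate : Prop := ∀ (any_password : String), Dom_deviate any_password → Spec_deviate any_password (deviate any_password)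

-- ===== LEMMAS AND PROOFS =====
-- the two fixed 94-char tables coincide
set_option maxRecDepth 100000 in
theorem pvTables_eq : pvShuffleA = pvTableB := by decide

set_option maxRecDepth 100000 in
theorem pvLen_eq : (pvShuffleA.length : Int) = (pvAsciiB.length : Int) := by decide

-- ===== VERDICT =====
theorem deviate_spec : Claim_equal_deviate := by
  intro s _
  show deviate s = deviate_alt s
  simp only [deviate, deviate_alt]
  rw [pvLen_eq, pvTables_eq]
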